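-- pv_equiv track=rewrite | github.com/mz00m/ai-labor-predictions | scripts/signals/fetch_stackoverflow.py | build_tag_map
-- ===== SOURCE A (Python) =====
-- def build_tag_map(taxonomy):
--     """Build a map of unique SO tags to their associated packages."""
--     tag_map = {}  # "tag" -> [package_names]
--     for pkg in taxonomy["packages"]:
--         tag = pkg.get("stackOverflowTag")
--         if not tag:
--             continue
--         if tag not in tag_map:
--             tag_map[tag] = []
--         tag_map[tag].append(pkg["name"])
--     return tag_map
-- ===== SOURCE B (Python) =====
-- def build_tag_map(taxonomy):
--     """Build a map of unique SO tags to their associated packages."""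
--     tagged = [(p["stackOverflowTag"], p["name"])
--               for p in taxonomy["packages"] if p.get("stackOverflowTag")]
--     seen = []
--     for t, _ in tagged:
--         if t not in seen:
--             seen.append(t)
--     return {t: [n for u, n in tagged if u == t] for t in seen}
-- ===== Notes on version B (the rewrite author's own statement) =====
-- stated objective: alternative
-- what changed: Replaces the running-dict accumulation (membership test + in-place append per package) with a single filtered (tag, name) projection, a first-seen distinct-tag pass, and a grouping comprehension per tag.
import Mathlib
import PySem

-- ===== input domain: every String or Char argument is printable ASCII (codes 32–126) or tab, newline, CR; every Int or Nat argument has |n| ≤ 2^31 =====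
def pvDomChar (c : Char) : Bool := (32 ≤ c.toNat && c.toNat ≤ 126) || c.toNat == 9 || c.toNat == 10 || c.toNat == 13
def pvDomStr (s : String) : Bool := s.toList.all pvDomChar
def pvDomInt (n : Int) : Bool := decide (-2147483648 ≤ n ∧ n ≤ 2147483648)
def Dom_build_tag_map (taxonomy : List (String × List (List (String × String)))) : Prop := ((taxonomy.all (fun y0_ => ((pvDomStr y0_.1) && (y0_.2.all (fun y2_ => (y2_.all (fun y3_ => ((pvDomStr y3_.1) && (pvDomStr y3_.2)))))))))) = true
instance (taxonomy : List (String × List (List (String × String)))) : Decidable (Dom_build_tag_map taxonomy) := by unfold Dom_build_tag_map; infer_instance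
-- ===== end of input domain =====

-- B replaces A's running-dict accumulation by a filtered (tag, name) projection, a
-- first-seen distinct-tag pass and one grouping pass per tag (objective: alternative).

-- ===== PORT A =====
-- literal transliteration of A: a dict built by membership-test + insert-empty + append
def build_tag_map (taxonomy : List (String × List (List (String × String)))) : List (String × List String) :=
  let pkgs := (PySem.Dict.get? (PySem.Dict.mk taxonomy) "packages").getD []
  (pkgs.foldl (fun (tag_map : PySem.Dict String (List String)) pkg =>
      let tag := (PySem.Dict.get? (PySem.Dict.mk pkg) "stackOverflowTag").getD ""
      if tag = "" then tag_map
      else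
        let tm := if tag_map.contains tag then tag_map else tag_map.insert tag []
        tm.modify tag [] (· ++ [(PySem.Dict.get? (PySem.Dict.mk pkg) "name").getD ""]))
    PySem.Dict.empty).items

-- ===== PORT B =====
def build_tag_map_alt (taxonomy : List (String × List (List (String × String)))) : List (String × List String) :=
  let pkgs := (PySem.Dict.get? (PySem.Dict.mk taxonomy) "packages").getD []
  let tagged := (pkgs.filter (fun p => (PySem.Dict.get? (PySem.Dict.mk p) "stackOverflowTag").getD "" ≠ "")).map
      (fun p => ((PySem.Dict.get? (PySem.Dict.mk p) "stackOverflowTag").getD "",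
                 (PySem.Dict.get? (PySem.Dict.mk p) "name").getD ""))
  let seen := tagged.foldl (fun (s : List String) tn => if tn.1 ∈ s then s else s ++ [tn.1]) []
  seen.map (fun t => (t, (tagged.filter (fun tn => tn.1 == t)).map (·.2)))

-- ===== PRECONDITION & SPEC =====
-- Pre_ excludes exactly the inputs where Python A raises: a taxonomy without a
-- "packages" key (KeyError), or a package with a truthy stackOverflowTag but no
-- "name" key (KeyError on pkg["name"]).  B raises at the same inputs.
def Pre_build_tag_map (taxonomy : List (String × List (List (String × String)))) : Prop :=
  (PySem.Dict.get? (PySem.Dict.mk taxonomy) "packages").isSome = true ∧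
  ∀ pkg ∈ (PySem.Dict.get? (PySem.Dict.mk taxonomy) "packages").getD [],
    (PySem.Dict.get? (PySem.Dict.mk pkg) "stackOverflowTag").getD "" ≠ "" →
    (PySem.Dict.get? (PySem.Dict.mk pkg) "name").isSome = true
instance (taxonomy : List (String × List (List (String × String)))) : Decidable (Pre_build_tag_map taxonomy) := by unfold Pre_build_tag_map; infer_instance
def pvWitness_build_tag_map : (List (String × List (List (String × String)))) :=
  [("packages", [[("stackOverflowTag", "python"), ("name", "numpy")],
                 [("name", "untagged")],
                 [("stackOverflowTag", "python"), ("name", "pandas")],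
                 [("stackOverflowTag", "r"), ("name", "dplyr")]])]

def Spec_build_tag_map (taxonomy : List (String × List (List (String × String)))) (out : List (String × List String)) : Prop := out = build_tag_map_alt taxonomy
instance (taxonomy : List (String × List (List (String × String)))) (out : List (String × List String)) : Decidable (Spec_build_tag_map taxonomy out) := by unfold Spec_build_tag_map; infer_instance

-- ===== CLAIM (what is proved, stated in full; the proofs are below) =====
def Claim_equal_build_tag_map : Prop := ∀ (taxonomy : List (String × List (List (String × String)))), Dom_build_tag_map taxonomy → Pre_build_tag_map taxonomy → Spec_build_tag_map taxonomy (build_tag_map taxonomy)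

-- ===== LEMMAS AND PROOFS =====

-- A's ensure-key-then-append on the same key is a single modify
theorem ensure_modify (d : PySem.Dict String (List String)) (t : String) (f : List String → List String) :
    ((if d.contains t then d else d.insert t []).modify t [] f) = d.modify t [] f := by
  by_cases h : d.contains t = true
  · simp [h]
  · have h' : d.contains t = false := by simp_all
    simp only [h', Bool.false_eq_true, if_false]
    show (d.insert t []).insert t (f ((d.insert t []).getD t [])) = d.insert t (f (d.getD t []))
    rw [PySem.Dict.insert_insert_self, PySem.Dict.getD_insert_self,
        PySem.Dict.getD_of_not_contains d [] h']

-- A's loop over the packages equals the modify-append loop over B's tagged pairs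
theorem foldA_eq_tagged (pkgs : List (List (String × String))) (d : PySem.Dict String (List String)) :
    pkgs.foldl (fun (tag_map : PySem.Dict String (List String)) pkg =>
      let tag := (PySem.Dict.get? (PySem.Dict.mk pkg) "stackOverflowTag").getD ""
      if tag = "" then tag_map
      else
        let tm := if tag_map.contains tag then tag_map else tag_map.insert tag []
        tm.modify tag [] (· ++ [(PySem.Dict.get? (PySem.Dict.mk pkg) "name").getD ""])) d
    = ((pkgs.filter (fun p => (PySem.Dict.get? (PySem.Dict.mk p) "stackOverflowTag").getD "" ≠ "")).map
      (fun p => ((PySem.Dict.get? (PySem.Dict.mk p) "stackOverflowTag").getD "",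
                 (PySem.Dict.get? (PySem.Dict.mk p) "name").getD ""))).foldl
        (fun d tn => d.modify tn.1 [] (· ++ [tn.2])) d := by
  induction pkgs generalizing d with
  | nil => rfl
  | cons p rest ih =>
    by_cases h : (PySem.Dict.get? (PySem.Dict.mk p) "stackOverflowTag").getD "" = ""
    · simp only [List.foldl_cons, List.filter_cons, h]
      simp only [ne_eq, not_true_eq_false, decide_false, Bool.false_eq_true, if_false]
      exact ih d
    · simp only [List.foldl_cons, List.filter_cons, ne_eq, h, not_false_eq_true,
        decide_true, if_true, List.map_cons, List.foldl_cons]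
      rw [ensure_modify]
      exact ih _

-- the modify-append loop, read off as keys × grouped values
theorem grouped (T : List (String × String)) :
    (T.foldl (fun (d : PySem.Dict String (List String)) tn => d.modify tn.1 [] (· ++ [tn.2])) PySem.Dict.empty).items
    = (T.foldl (fun (s : List String) tn => if tn.1 ∈ s then s else s ++ [tn.1]) []).map
        (fun t => (t, (T.filter (fun tn => tn.1 == t)).map (·.2))) := by
  have hnd : (T.foldl (fun (d : PySem.Dict String (List String)) tn => d.modify tn.1 [] (· ++ [tn.2])) PySem.Dict.empty).keys.Nodup :=
    PySem.Dict.nodup_keys_foldl_modify_key T Prod.fst [] (fun _ tn => (· ++ [tn.2])) PySem.Dict.empty (by simp [PySem.Dict.keys_empty])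
  rw [PySem.Dict.items_eq_map_keys _ hnd []]
  have hkeys : (T.foldl (fun (d : PySem.Dict String (List String)) tn => d.modify tn.1 [] (· ++ [tn.2])) PySem.Dict.empty).keys
      = PySem.Set.ofList (T.map Prod.fst) := by
    rw [PySem.Dict.keys_foldl_modify_key T Prod.fst [] (fun _ tn => (· ++ [tn.2])) PySem.Dict.empty]
    simp [PySem.Dict.keys_empty, PySem.Set.update_nil_left]
  have hseen : (T.foldl (fun (s : List String) tn => if tn.1 ∈ s then s else s ++ [tn.1]) [])
      = PySem.Set.ofList (T.map Prod.fst) := by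
    rw [← PySem.Set.update_nil_left, PySem.Set.update_map_eq_foldl_add]
    simp [PySem.Set.add_eq_ite]
  rw [hkeys, hseen]
  refine List.map_congr_left (fun t _ => ?_)
  have hg := PySem.Dict.getD_foldl_modify_append T (PySem.Dict.empty (κ := String) (ν := List String)) t
  simp only [PySem.Dict.getD_empty, List.nil_append] at hg
  rw [hg]

-- ===== VERDICT (by name: the statement is the Claim_ definition above) =====
theorem build_tag_map_spec : Claim_equal_build_tag_map := by
  intro taxonomy _ _
  unfold Spec_build_tag_map build_tag_map build_tag_map_alt
  exact (congrArg PySem.Dict.items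
      (foldA_eq_tagged ((PySem.Dict.get? (PySem.Dict.mk taxonomy) "packages").getD [])
        PySem.Dict.empty)).trans (grouped _)
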